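-- pv_equiv track=rewrite | github.com/mmythen/distributive-sort | distributive_sort.py | distributive_sort
-- ===== SOURCE A (Python) =====
-- def distributive_sort(arr):
--     s = sum(arr)
--     m = min(arr)
--     l = len(arr)
--     res = [m + i for i in range(l)]
--
--     index = l-1
--     curr_sum = sum(res)
--
--     if curr_sum == s:
--         return res
--     elif curr_sum > s:
--         while curr_sum > s:
--             res[(l-index-1)%l] -= 1
--             curr_sum -= 1
--             index -= 1
--         return res
--     else:
--         while curr_sum < s:
--             res[index%l] += 1
--             curr_sum += 1
--             index -= 1
--         return res
-- ===== SOURCE B (Python) =====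
-- def distributive_sort(arr):
--     l = len(arr)
--     m = min(arr)
--     d = sum(arr) - (m * l + l * (l - 1) // 2)
--     q, r = divmod(d, l)
--     return [m + i + q + (1 if i >= l - r else 0) for i in range(l)]
-- ===== Notes on version B (the rewrite author's own statement) =====
-- stated objective: faster
-- what changed: Replaced the two unit-step while loops (one iteration per unit of |sum(arr)-sum(res)|) by a closed-form round-robin distribution: divmod(d, l) gives each element d//l and the last d%l elements one extra.
import Mathlib
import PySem

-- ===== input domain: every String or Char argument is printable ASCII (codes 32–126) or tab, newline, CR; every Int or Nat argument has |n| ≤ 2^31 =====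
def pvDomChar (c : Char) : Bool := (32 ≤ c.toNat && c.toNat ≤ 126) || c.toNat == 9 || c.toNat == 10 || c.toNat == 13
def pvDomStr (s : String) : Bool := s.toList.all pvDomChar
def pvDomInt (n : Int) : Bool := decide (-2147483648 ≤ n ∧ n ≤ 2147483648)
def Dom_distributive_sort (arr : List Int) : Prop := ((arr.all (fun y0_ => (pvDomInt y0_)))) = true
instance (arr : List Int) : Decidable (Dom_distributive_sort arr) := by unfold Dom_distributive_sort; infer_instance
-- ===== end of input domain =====

-- B replaces A's two unit-step while loops by a closed-form divmod round-robin distribution (objective: faster).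
-- ===== PORT A =====
-- the `while curr_sum > s` loop: one call per iteration, fuel = number of iterations (curr_sum - s)
def pyDecLoop (l : Int) : Nat → List Int → Int → List Int
  | 0, res, _ => res
  | n+1, res, index =>
      pyDecLoop l n (res.modify (PySem.Int.mod (l - index - 1) l).toNat (fun x => x - 1)) (index - 1)

-- the `while curr_sum < s` loop
def pyIncLoop (l : Int) : Nat → List Int → Int → List Int
  | 0, res, _ => res
  | n+1, res, index =>
      pyIncLoop l n (res.modify (PySem.Int.mod index l).toNat (fun x => x + 1)) (index - 1)

def distributive_sort (arr : List Int) : List Int :=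
  let s := arr.sum
  match PySem.List.min? arr (fun x => x) with   -- min([]) raises ValueError: excluded by Pre_
  | none => []
  | some m =>
    let l : Int := arr.length
    let res := (List.range arr.length).map (fun i : Nat => m + (i : Int))
    let currSum := res.sum
    if currSum = s then res
    else if currSum > s then pyDecLoop l (currSum - s).toNat res (l - 1)
    else pyIncLoop l (s - currSum).toNat res (l - 1)

-- ===== PORT B =====
def distributive_sort_alt (arr : List Int) : List Int :=
  let l : Int := arr.length
  match PySem.List.min? arr (fun x => x) with   -- min([]) raises ValueError: excluded by Pre_
  | none => []
  | some m =>
    let d := arr.sum - (m * l + PySem.Int.floordiv (l * (l - 1)) 2)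
    let q := PySem.Int.floordiv d l
    let r := PySem.Int.mod d l
    (List.range arr.length).map (fun i : Nat => m + (i : Int) + q + (if l - r ≤ (i : Int) then 1 else 0))

-- ===== PRECONDITION & SPEC =====
-- Pre_ excludes only the empty list, on which Python A (and B) raise ValueError at min([]).
def Pre_distributive_sort (arr : List Int) : Prop := arr ≠ []
instance (arr : List Int) : Decidable (Pre_distributive_sort arr) := by unfold Pre_distributive_sort; infer_instance
def pvWitness_distributive_sort : List Int := [3, 1, 2]

def Spec_distributive_sort (arr : List Int) (out : List Int) : Prop := out = distributive_sort_alt arr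
instance (arr : List Int) (out : List Int) : Decidable (Spec_distributive_sort arr out) := by unfold Spec_distributive_sort; infer_instance

-- ===== CLAIM (what is proved, stated in full; the proofs are below) =====
def Claim_equal_distributive_sort : Prop := ∀ (arr : List Int), Dom_distributive_sort arr → Pre_distributive_sort arr → Spec_distributive_sort arr (distributive_sort arr)

-- ===== LEMMAS AND PROOFS =====

-- peel the LAST iteration off the dec loop
theorem pyDecLoop_peel (l : Int) (n : Nat) (res : List Int) (idx : Int) :
    pyDecLoop l (n+1) res idx
      = (pyDecLoop l n res idx).modify (PySem.Int.mod (l - (idx - n) - 1) l).toNat (fun x => x - 1) := by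
  induction n generalizing res idx with
  | zero => simp [pyDecLoop]
  | succ k ih =>
      show pyDecLoop l (k+1) _ (idx - 1) = _
      rw [ih]
      have : idx - 1 - (k : Int) = idx - ((k : Nat) + 1 : Nat) := by push_cast; ring
      rw [this]
      rfl

-- peel the LAST iteration off the inc loop
theorem pyIncLoop_peel (l : Int) (n : Nat) (res : List Int) (idx : Int) :
    pyIncLoop l (n+1) res idx
      = (pyIncLoop l n res idx).modify (PySem.Int.mod (idx - n) l).toNat (fun x => x + 1) := by
  induction n generalizing res idx with
  | zero => simp [pyIncLoop]
  | succ k ih =>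
      show pyIncLoop l (k+1) _ (idx - 1) = _
      rw [ih]
      have : idx - 1 - (k : Int) = idx - ((k : Nat) + 1 : Nat) := by push_cast; ring
      rw [this]
      rfl

theorem decLoop_closed (n : Nat) (hn : 0 < n) (m : Int) (e : Nat) :
    pyDecLoop (n : Int) e ((List.range n).map (fun i : Nat => m + (i : Int))) ((n : Int) - 1)
      = (List.range n).map (fun i : Nat => m + (i : Int) - (e : Int) / n - (if (i : Int) < (e : Int) % n then 1 else 0)) := by
  induction e with
  | zero =>
      show (List.range n).map (fun i : Nat => m + (i : Int)) = _
      apply List.map_congr_left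
      intro i hi
      rw [List.mem_range] at hi
      have hi' : 0 ≤ (i : Int) := by positivity
      push_cast
      rw [Int.zero_ediv, Int.zero_emod, if_neg (by omega)]
      ring
  | succ e ih =>
      have hn' : (0 : Int) < (n : Int) := by exact_mod_cast hn
      rw [pyDecLoop_peel, ih]
      have hq := Int.mul_ediv_add_emod (e : Int) (n : Int)
      have hr0 : 0 ≤ (e : Int) % n := Int.emod_nonneg _ (by omega)
      have hrn : (e : Int) % n < n := Int.emod_lt_of_pos _ hn'
      have hpos : PySem.Int.mod ((n : Int) - ((n : Int) - 1 - (e : Nat)) - 1) n = (e : Int) % n := by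
        rw [PySem.Int.mod_eq_emod_of_pos hn']
        congr 1
        ring
      have hsucc : ((e : Int) + 1) / n = (e : Int) / n + (if (e : Int) % n = n - 1 then 1 else 0) ∧
          ((e : Int) + 1) % n = (if (e : Int) % n = n - 1 then 0 else (e : Int) % n + 1) := by
        by_cases hc : (e : Int) % n = n - 1
        · simp only [hc, if_pos]
          have h1 : (0 : Int) + (n : Int) * ((e : Int) / n + 1) = (e : Int) + 1 := by
            have : (n : Int) * ((e : Int) / n + 1) = (n : Int) * ((e : Int) / n) + n := by ring
            omega
          have := (Int.ediv_emod_unique hn').mpr ⟨h1, le_refl 0, hn'⟩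
          exact ⟨by omega, by omega⟩
        · simp only [hc, if_false]
          have h1 : ((e : Int) % n + 1) + (n : Int) * ((e : Int) / n) = (e : Int) + 1 := by omega
          have := (Int.ediv_emod_unique hn').mpr ⟨h1, by omega, by omega⟩
          exact ⟨by omega, by omega⟩
      apply List.ext_getElem
      · simp
      intro i h1 h2
      rw [List.getElem_modify]
      simp only [List.getElem_map, List.getElem_range]
      have hi : i < n := by simpa using h2
      have hi' : (i : Int) < n := by exact_mod_cast hi
      rw [hpos]
      push_cast
      rw [hsucc.1, hsucc.2]
      by_cases hc : (e : Int) % n = n - 1 <;> simp only [hc, if_pos, if_false] <;>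
        split_ifs <;> omega

theorem incLoop_closed (n : Nat) (hn : 0 < n) (m : Int) (e : Nat) :
    pyIncLoop (n : Int) e ((List.range n).map (fun i : Nat => m + (i : Int))) ((n : Int) - 1)
      = (List.range n).map (fun i : Nat => m + (i : Int) + (e : Int) / n + (if (n : Int) - (e : Int) % n ≤ (i : Int) then 1 else 0)) := by
  induction e with
  | zero =>
      show (List.range n).map (fun i : Nat => m + (i : Int)) = _
      apply List.map_congr_left
      intro i hi
      rw [List.mem_range] at hi
      have hi' : (i : Int) < n := by exact_mod_cast hi
      push_cast
      rw [Int.zero_ediv, Int.zero_emod, sub_zero, if_neg (by omega)]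
      ring
  | succ e ih =>
      have hn' : (0 : Int) < (n : Int) := by exact_mod_cast hn
      rw [pyIncLoop_peel, ih]
      have hq := Int.mul_ediv_add_emod (e : Int) (n : Int)
      have hr0 : 0 ≤ (e : Int) % n := Int.emod_nonneg _ (by omega)
      have hrn : (e : Int) % n < n := Int.emod_lt_of_pos _ hn'
      have hpos : PySem.Int.mod ((n : Int) - 1 - (e : Nat)) n = (n : Int) - 1 - (e : Int) % n := by
        rw [PySem.Int.mod_eq_emod_of_pos hn', Int.sub_emod,
            Int.emod_eq_of_lt (a := (n:Int) - 1) (by omega) (by omega),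
            Int.emod_eq_of_lt (by omega) (by omega)]
      have hsucc : ((e : Int) + 1) / n = (e : Int) / n + (if (e : Int) % n = n - 1 then 1 else 0) ∧
          ((e : Int) + 1) % n = (if (e : Int) % n = n - 1 then 0 else (e : Int) % n + 1) := by
        by_cases hc : (e : Int) % n = n - 1
        · simp only [hc, if_pos]
          have h1 : (0 : Int) + (n : Int) * ((e : Int) / n + 1) = (e : Int) + 1 := by
            have : (n : Int) * ((e : Int) / n + 1) = (n : Int) * ((e : Int) / n) + n := by ring
            omega
          have := (Int.ediv_emod_unique hn').mpr ⟨h1, le_refl 0, hn'⟩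
          exact ⟨by omega, by omega⟩
        · simp only [hc, if_false]
          have h1 : ((e : Int) % n + 1) + (n : Int) * ((e : Int) / n) = (e : Int) + 1 := by omega
          have := (Int.ediv_emod_unique hn').mpr ⟨h1, by omega, by omega⟩
          exact ⟨by omega, by omega⟩
      apply List.ext_getElem
      · simp
      intro i h1 h2
      rw [List.getElem_modify]
      simp only [List.getElem_map, List.getElem_range]
      have hi : i < n := by simpa using h2
      have hi' : (i : Int) < n := by exact_mod_cast hi
      rw [hpos]
      push_cast
      rw [hsucc.1, hsucc.2]
      by_cases hc : (e : Int) % n = n - 1 <;> simp only [hc, if_pos, if_false] <;>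
        split_ifs <;> omega

theorem sum_base (m : Int) (n : Nat) :
    2 * ((List.range n).map (fun i : Nat => m + (i : Int))).sum = 2 * m * n + n * n - n := by
  induction n with
  | zero => simp
  | succ k ih =>
      rw [List.range_succ, List.map_append, List.sum_append]
      simp only [List.map_cons, List.map_nil, List.sum_cons, List.sum_nil]
      push_cast
      linear_combination ih

-- ===== VERDICT (by name: the statement is the Claim_ definition above) =====
theorem distributive_sort_spec : Claim_equal_distributive_sort := by
  intro arr _ hpre
  unfold Pre_distributive_sort at hpre
  obtain ⟨m, hm⟩ : ∃ m, PySem.List.min? arr (fun x => x) = some m := by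
    cases h : PySem.List.min? arr (fun x => x) with
    | none => exact absurd ((PySem.List.min?_eq_none_iff arr _).mp h) hpre
    | some m => exact ⟨m, rfl⟩
  unfold Spec_distributive_sort distributive_sort distributive_sort_alt
  simp only [hm]
  have hn : 0 < arr.length := List.length_pos_iff.mpr hpre
  set n := arr.length with hnn
  have hn' : (0 : Int) < (n : Int) := by exact_mod_cast hn
  set S := arr.sum with hS
  set curr := ((List.range n).map (fun i : Nat => m + (i : Int))).sum with hcurr
  have hsum := sum_base m n
  rw [← hcurr] at hsum
  have hfd : m * (n : Int) + PySem.Int.floordiv ((n : Int) * ((n : Int) - 1)) 2 = curr := by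
    rw [PySem.Int.floordiv_eq_ediv_of_pos (by norm_num),
        show (n : Int) * ((n : Int) - 1) = (n : Int) * (n : Int) - (n : Int) from by ring]
    obtain ⟨M, hM⟩ : ∃ M, m * (n : Int) = M := ⟨_, rfl⟩
    obtain ⟨P, hP⟩ : ∃ P, (n : Int) * (n : Int) = P := ⟨_, rfl⟩
    have hsum' : 2 * curr = 2 * M + P - (n : Int) := by rw [← hM, ← hP]; linear_combination hsum
    rw [hM, hP]
    omega
  rw [hfd]
  split_ifs with h1 h2
  · -- curr = S : the closed form at d = 0 is the base ramp
    rw [show S - curr = 0 from by omega, PySem.Int.floordiv_eq_ediv_of_pos hn',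
        PySem.Int.mod_eq_emod_of_pos hn', Int.zero_ediv, Int.zero_emod, sub_zero]
    apply List.map_congr_left
    intro i hi
    rw [List.mem_range] at hi
    have hi' : (i : Int) < n := by exact_mod_cast hi
    rw [if_neg (by omega)]
    ring
  · -- curr > S : the dec loop
    obtain ⟨e, he⟩ : ∃ e : Nat, (e : Int) = curr - S := ⟨(curr - S).toNat, Int.toNat_of_nonneg (by omega)⟩
    rw [show (curr - S).toNat = e from by omega, decLoop_closed n hn m e]
    have hq := Int.mul_ediv_add_emod (e : Int) (n : Int)
    have hr0 : 0 ≤ (e : Int) % n := Int.emod_nonneg _ (by omega)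
    have hrn : (e : Int) % n < n := Int.emod_lt_of_pos _ hn'
    have hd : S - curr = -(e : Int) := by omega
    rw [hd, PySem.Int.floordiv_eq_ediv_of_pos hn', PySem.Int.mod_eq_emod_of_pos hn']
    have hneg : (-(e : Int)) / n = -((e : Int) / n) - (if (e : Int) % n = 0 then 0 else 1) ∧
        (-(e : Int)) % n = (if (e : Int) % n = 0 then 0 else (n : Int) - (e : Int) % n) := by
      by_cases hc : (e : Int) % n = 0
      · simp only [hc, if_pos]
        have hx : (0 : Int) + (n : Int) * (-((e : Int) / n)) = -(e : Int) := by
          have : (n : Int) * (-((e : Int) / n)) = -((n : Int) * ((e : Int) / n)) := by ring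
          omega
        have := (Int.ediv_emod_unique hn').mpr ⟨hx, le_refl 0, hn'⟩
        exact ⟨by omega, by omega⟩
      · simp only [hc, if_false]
        have hx : ((n : Int) - (e : Int) % n) + (n : Int) * (-((e : Int) / n) - 1) = -(e : Int) := by
          have : (n : Int) * (-((e : Int) / n) - 1) = -((n : Int) * ((e : Int) / n)) - n := by ring
          omega
        have := (Int.ediv_emod_unique hn').mpr ⟨hx, by omega, by omega⟩
        exact ⟨by omega, by omega⟩
    rw [hneg.1, hneg.2]
    apply List.map_congr_left
    intro i hi
    rw [List.mem_range] at hi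
    have hi' : (i : Int) < n := by exact_mod_cast hi
    have hi0 : 0 ≤ (i : Int) := by positivity
    by_cases hc : (e : Int) % n = 0 <;> simp only [hc, if_pos, if_false] <;> split_ifs <;> omega
  · -- curr < S : the inc loop
    obtain ⟨e, he⟩ : ∃ e : Nat, (e : Int) = S - curr := ⟨(S - curr).toNat, Int.toNat_of_nonneg (by omega)⟩
    rw [show (S - curr).toNat = e from by omega, incLoop_closed n hn m e,
        PySem.Int.floordiv_eq_ediv_of_pos hn', PySem.Int.mod_eq_emod_of_pos hn', ← he]
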